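-- pv_equiv track=rewrite | github.com/abdulrehhhhman/fitness_ai | backend/recommender/service.py | filter_meals_by_allergies
-- ===== SOURCE A (Python) =====
-- from typing import List, Dict, Any
--
-- def filter_meals_by_allergies(meals: List[str], allergies: List[str]) -> List[str]:
--     """
--     Filter out meals that contain allergens
--     """
--     if not allergies:
--         return meals
--
--     # Simple allergen filtering (in a real app, you'd have more detailed ingredient data)
--     allergen_keywords = {
--         "nuts": ["almond", "peanut", "walnut", "cashew"],
--         "dairy": ["cheese", "yogurt", "milk"],
--         "gluten": ["bread", "pasta", "wheat"],
--         "eggs": ["egg", "omelet"],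
--         "soy": ["tofu", "soy"],
--         "fish": ["salmon", "tuna", "fish"],
--         "shellfish": ["shrimp", "crab", "lobster"]
--     }
--
--     filtered_meals = []
--     for meal in meals:
--         meal_lower = meal.lower()
--         contains_allergen = False
--
--         for allergy in allergies:
--             allergy_lower = allergy.lower()
--             # Check if allergy is in our keyword mapping
--             if allergy_lower in allergen_keywords:
--                 keywords = allergen_keywords[allergy_lower]
--                 if any(keyword in meal_lower for keyword in keywords):
--                     contains_allergen = True
--                     break
--             # Direct keyword match
--             elif allergy_lower in meal_lower:
--                 contains_allergen = True
--                 break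
--
--         if not contains_allergen:
--             filtered_meals.append(meal)
--
--     return filtered_meals
-- ===== SOURCE B (Python) =====
-- def filter_meals_by_allergies(meals, allergies):
--     """
--     Filter out meals that contain allergens
--     """
--     allergen_keywords = {
--         "nuts": ["almond", "peanut", "walnut", "cashew"],
--         "dairy": ["cheese", "yogurt", "milk"],
--         "gluten": ["bread", "pasta", "wheat"],
--         "eggs": ["egg", "omelet"],
--         "soy": ["tofu", "soy"],
--         "fish": ["salmon", "tuna", "fish"],
--         "shellfish": ["shrimp", "crab", "lobster"]
--     }
--     # Precompute the flat list of search terms once, then scan meals in one pass.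
--     terms = []
--     for allergy in allergies:
--         al = allergy.lower()
--         if al in allergen_keywords:
--             terms += allergen_keywords[al]
--         else:
--             terms.append(al)
--     return [m for m in meals if not any(t in m.lower() for t in terms)]
-- ===== Notes on version B (the rewrite author's own statement) =====
-- stated objective: simpler
-- what changed: Replaces the per-meal nested allergy branching (with break and a flag) by precomputing a flat list of search terms once from the allergies, then a single comprehension keeping meals containing none of the terms; the empty-allergies early return disappears since no terms match everything.
import Mathlib
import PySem

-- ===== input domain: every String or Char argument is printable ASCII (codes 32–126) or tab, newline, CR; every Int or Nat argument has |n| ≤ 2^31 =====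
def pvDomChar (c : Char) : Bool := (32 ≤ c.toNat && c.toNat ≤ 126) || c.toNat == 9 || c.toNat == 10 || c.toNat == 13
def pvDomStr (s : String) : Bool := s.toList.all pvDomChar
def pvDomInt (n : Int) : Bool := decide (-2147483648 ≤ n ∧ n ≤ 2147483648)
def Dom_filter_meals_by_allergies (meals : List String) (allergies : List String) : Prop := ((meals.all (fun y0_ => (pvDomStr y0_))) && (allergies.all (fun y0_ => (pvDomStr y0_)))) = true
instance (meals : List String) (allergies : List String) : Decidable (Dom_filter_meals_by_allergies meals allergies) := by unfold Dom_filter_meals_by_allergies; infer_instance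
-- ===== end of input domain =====

-- B replaces the per-meal nested allergy branching by precomputing a flat term list once and
-- filtering meals in a single pass (simpler decomposition; same result).

-- module constant: the allergen keyword table (shared data of both versions)
def allergenKeywords : PySem.Dict String (List String) :=
  PySem.Dict.ofList [("nuts", ["almond", "peanut", "walnut", "cashew"]),
   ("dairy", ["cheese", "yogurt", "milk"]),
   ("gluten", ["bread", "pasta", "wheat"]),
   ("eggs", ["egg", "omelet"]),
   ("soy", ["tofu", "soy"]),
   ("fish", ["salmon", "tuna", "fish"]),
   ("shellfish", ["shrimp", "crab", "lobster"])]

-- ===== PORT A =====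
-- A's inner `for allergy in allergies: … break` loop, returning the contains_allergen flag
def containsAllergenA (meal_lower : String) : List String → Bool
  | [] => false
  | allergy :: rest =>
    let allergy_lower := PySem.Str.lower allergy
    if PySem.Dict.contains allergenKeywords allergy_lower then
      let keywords := (PySem.Dict.get? allergenKeywords allergy_lower).getD []
      if keywords.any (fun keyword => PySem.Str.isIn keyword meal_lower) then true
      else containsAllergenA meal_lower rest
    else if PySem.Str.isIn allergy_lower meal_lower then true
    else containsAllergenA meal_lower rest

def filter_meals_by_allergies (meals : List String) (allergies : List String) : List String :=
  if allergies = [] then meals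
  else
    meals.foldl (fun filtered_meals meal =>
      let meal_lower := PySem.Str.lower meal
      let contains_allergen := containsAllergenA meal_lower allergies
      if !contains_allergen then filtered_meals ++ [meal] else filtered_meals) []

-- ===== PORT B =====
def filter_meals_by_allergies_alt (meals : List String) (allergies : List String) : List String :=
  let terms := allergies.foldl (fun ts allergy =>
    let al := PySem.Str.lower allergy
    if PySem.Dict.contains allergenKeywords al then
      ts ++ (PySem.Dict.get? allergenKeywords al).getD []
    else ts ++ [al]) []
  meals.filter (fun m => !(terms.any (fun t => PySem.Str.isIn t (PySem.Str.lower m))))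

-- ===== PRECONDITION & SPEC =====
def Spec_filter_meals_by_allergies (meals : List String) (allergies : List String) (out : List String) : Prop := out = filter_meals_by_allergies_alt meals allergies
instance (meals : List String) (allergies : List String) (out : List String) : Decidable (Spec_filter_meals_by_allergies meals allergies out) := by unfold Spec_filter_meals_by_allergies; infer_instance

-- ===== CLAIM (what is proved, stated in full; the proofs are below) =====
def Claim_equal_filter_meals_by_allergies : Prop := ∀ (meals : List String) (allergies : List String), Dom_filter_meals_by_allergies meals allergies → Spec_filter_meals_by_allergies meals allergies (filter_meals_by_allergies meals allergies)

-- ===== LEMMAS AND PROOFS =====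

-- the term list B builds, as a function (foldl with an explicit accumulator)
def bStep (ts : List String) (allergy : String) : List String :=
  let al := PySem.Str.lower allergy
  if PySem.Dict.contains allergenKeywords al then
    ts ++ (PySem.Dict.get? allergenKeywords al).getD []
  else ts ++ [al]

-- B's any-over-terms equals A's break loop, for any accumulator
theorem terms_any_eq (ml : String) (allergies : List String) (acc : List String) :
    (allergies.foldl bStep acc).any (fun t => PySem.Str.isIn t ml)
      = (acc.any (fun t => PySem.Str.isIn t ml) || containsAllergenA ml allergies) := by
  induction allergies generalizing acc with
  | nil => simp [containsAllergenA]
  | cons a rest ih =>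
    simp only [List.foldl_cons]
    rw [ih]
    simp only [containsAllergenA, bStep]
    by_cases h : PySem.Dict.contains allergenKeywords (PySem.Str.lower a)
    · simp only [h, if_true, List.any_append]
      generalize acc.any (fun t => PySem.Str.isIn t ml) = A
      generalize ((PySem.Dict.get? allergenKeywords (PySem.Str.lower a)).getD []).any
          (fun keyword => PySem.Str.isIn keyword ml) = K
      generalize containsAllergenA ml rest = C
      cases K <;> cases A <;> cases C <;> simp
    · simp only [h]
      cases hI : PySem.Chars.isIn (PySem.Chars.lower a.toList) ml.toList <;>
        simp [hI, Bool.or_comm]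

-- A's foldl-append accumulation is filter
theorem foldl_eq_filter (allergies : List String) (meals acc : List String) :
    meals.foldl (fun filtered_meals meal =>
      let meal_lower := PySem.Str.lower meal
      let contains_allergen := containsAllergenA meal_lower allergies
      if !contains_allergen then filtered_meals ++ [meal] else filtered_meals) acc
    = acc ++ meals.filter (fun m => !(containsAllergenA (PySem.Str.lower m) allergies)) := by
  induction meals generalizing acc with
  | nil => simp
  | cons m rest ih =>
    simp only [List.foldl_cons]
    rw [ih]
    by_cases h : containsAllergenA (PySem.Str.lower m) allergies <;> simp [h]

-- ===== VERDICT (by name: the statement is the Claim_ definition above) =====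
theorem filter_meals_by_allergies_spec : Claim_equal_filter_meals_by_allergies := by
  intro meals allergies _
  unfold Spec_filter_meals_by_allergies filter_meals_by_allergies filter_meals_by_allergies_alt
  have hterms : ∀ m : String,
      ((allergies.foldl bStep []).any (fun t => PySem.Str.isIn t (PySem.Str.lower m)))
        = containsAllergenA (PySem.Str.lower m) allergies := by
    intro m; rw [terms_any_eq]; simp
  by_cases h : allergies = []
  · subst h
    simp
  · simp only [h]
    rw [foldl_eq_filter]
    simp only [List.nil_append]
    apply List.filter_congr
    intro m _
    show (!containsAllergenA (PySem.Str.lower m) allergies) = _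
    rw [← hterms m]
    rfl
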